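-- pv_equiv track=rewrite | github.com/OliverSpacey/Data-Driven-Assignment-OCR | data driven assignment/system.py | checkBelow
-- ===== SOURCE A (Python) =====
-- def compare(string, array):
--     for i in range(len(string)):
--         if string[i] != array[i]:
--             return False
--     return True
--
-- def compareEstimate(string, array):
--     incorrect = 0
--     for i in range(len(string)):
--         if string[i] != array[i]:
--             incorrect += 1
--     if incorrect > 1:
--         return False
--     else:
--         return True
--
-- def checkBelow(array, word, i, j, height, width, estimate):
--     temp = []
--     if i+len(word)-1 < height:
--         for x in range(len(word)):
--             temp.append(array[i+x][j])
--         if (compare(word, temp) and not estimate) or (compareEstimate(word, temp) and estimate):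
--             return True
--     return False
-- ===== SOURCE B (Python) =====
-- def checkBelow(array, word, i, j, height, width, estimate):
--     if i + len(word) - 1 >= height:
--         return False
--     for x in range(len(word)):
--         if word[x] != array[i + x][j]:
--             # first mismatch: tolerable only as the single correction of estimate
--             # mode, so the remainder of the column must match exactly
--             return estimate and all(
--                 word[y] == array[i + y][j] for y in range(x + 1, len(word)))
--     return True
-- ===== Notes on version B (the rewrite author's own statement) =====
-- stated objective: alternative
-- what changed: Replaced A's temp-list build plus the two full-pass comparators (compare/compareEstimate, combined by flag logic) with an early-exit scan that returns at the first mismatch, where the answer is 'estimate and the remainder matches exactly' (one correction is all estimate mode may spend).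
import Mathlib
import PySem

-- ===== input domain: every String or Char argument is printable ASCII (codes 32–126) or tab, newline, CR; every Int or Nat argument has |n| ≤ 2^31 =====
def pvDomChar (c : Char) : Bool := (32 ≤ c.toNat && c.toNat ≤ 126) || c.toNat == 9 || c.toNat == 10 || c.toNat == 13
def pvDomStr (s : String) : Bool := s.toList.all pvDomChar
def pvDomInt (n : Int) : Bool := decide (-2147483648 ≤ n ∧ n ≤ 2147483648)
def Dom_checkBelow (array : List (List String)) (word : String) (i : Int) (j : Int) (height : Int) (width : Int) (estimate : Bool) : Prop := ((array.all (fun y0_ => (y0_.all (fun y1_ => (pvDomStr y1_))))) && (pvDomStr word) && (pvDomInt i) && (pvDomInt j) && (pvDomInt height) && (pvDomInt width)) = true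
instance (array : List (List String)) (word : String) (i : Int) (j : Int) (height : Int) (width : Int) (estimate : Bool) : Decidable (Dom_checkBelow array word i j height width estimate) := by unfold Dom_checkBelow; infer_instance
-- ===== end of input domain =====

-- B replaces A's temp-list build plus its two full-pass comparators by an early-exit scan:
-- return at the FIRST mismatch, where the answer is 'estimate and the rest matches exactly'
-- (a single correction is all estimate mode may spend). Same O(len(word)) cost.

-- ===== PORT A =====
-- Python 1-char string s[x] compared with list element arr[x]; an out-of-range Option
-- (= Python IndexError) is unreachable in A's use of these helpers (arr has len(s) elements).
-- helper compare(string, array): early-return loop = all indices agree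
def pvCompare (s : String) (arr : List String) : Bool :=
  (List.range s.toList.length).all (fun (x : Nat) =>
    (PySem.Str.pyGet? s (x : Int)).map (fun c => [c]) == (PySem.List.pyGet? arr (x : Int)).map String.toList)

-- helper compareEstimate(string, array)
def pvCompareEstimate (s : String) (arr : List String) : Bool :=
  let incorrect : Int := (List.range s.toList.length).foldl (fun acc (x : Nat) =>
    if (PySem.Str.pyGet? s (x : Int)).map (fun c => [c]) == (PySem.List.pyGet? arr (x : Int)).map String.toList
    then acc else acc + 1) 0
  if incorrect > 1 then false else true

def checkBelow (array : List (List String)) (word : String) (i : Int) (j : Int) (height : Int) (width : Int) (estimate : Bool) : Bool :=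
  if i + (word.toList.length : Int) - 1 < height then
    -- temp built by appending array[i+x][j]; none = IndexError (excluded by Pre_)
    let temp? : Option (List String) := (List.range word.toList.length).foldl
      (fun acc (x : Nat) => acc.bind (fun t =>
        ((PySem.List.pyGet? array (i + (x : Int))).bind (fun row => PySem.List.pyGet? row j)).map
          (fun e => t ++ [e]))) (some [])
    match temp? with
    | none => false
    | some temp =>
      if (pvCompare word temp && !estimate) || (pvCompareEstimate word temp && estimate) then true
      else false
  else false

-- ===== PORT B =====
-- word[x] == array[i+x][j]; a 'none' on the array side is Python's IndexError (excluded by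
-- Pre_; here it compares unequal, unreachable inside the claims)
def pvEqAt (array : List (List String)) (word : String) (i : Int) (j : Int) (x : Int) : Bool :=
  (PySem.Str.pyGet? word x).map (fun c => [c])
    == ((PySem.List.pyGet? array (i + x)).bind (fun row => PySem.List.pyGet? row j)).map String.toList

-- the 'for x in range(len(word))' loop with its early return at the first mismatch
def pvScanB (array : List (List String)) (word : String) (i : Int) (j : Int) (estimate : Bool) : List Int → Bool
  | [] => true
  | x :: rest =>
    if pvEqAt array word i j x then pvScanB array word i j estimate rest
    else estimate
      && (PySem.List.pyRange (x + 1) (word.toList.length : Int) 1).all (pvEqAt array word i j)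

def checkBelow_alt (array : List (List String)) (word : String) (i : Int) (j : Int) (height : Int) (width : Int) (estimate : Bool) : Bool :=
  if i + (word.toList.length : Int) - 1 ≥ height then false
  else pvScanB array word i j estimate (PySem.List.pyRange 0 (word.toList.length : Int) 1)

-- ===== PRECONDITION & SPEC =====
-- Pre_ excludes exactly the inputs where A raises IndexError (a column read out of range).
def Pre_checkBelow (array : List (List String)) (word : String) (i : Int) (j : Int) (height : Int) (width : Int) (estimate : Bool) : Prop :=
  i + (word.toList.length : Int) - 1 < height →
    ∀ x : Nat, x < word.toList.length →
      (((PySem.List.pyGet? array (i + (x : Int))).bind (fun row => PySem.List.pyGet? row j)).isSome = true)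
instance (array : List (List String)) (word : String) (i : Int) (j : Int) (height : Int) (width : Int) (estimate : Bool) : Decidable (Pre_checkBelow array word i j height width estimate) := by unfold Pre_checkBelow; infer_instance

def pvWitness_checkBelow : List (List String) × String × Int × Int × Int × Int × Bool :=
  ([["a"], ["b"]], "ab", 0, 0, 2, 1, false)

def Spec_checkBelow (array : List (List String)) (word : String) (i : Int) (j : Int) (height : Int) (width : Int) (estimate : Bool) (out : Bool) : Prop := out = checkBelow_alt array word i j height width estimate
instance (array : List (List String)) (word : String) (i : Int) (j : Int) (height : Int) (width : Int) (estimate : Bool) (out : Bool) : Decidable (Spec_checkBelow array word i j height width estimate out) := by unfold Spec_checkBelow; infer_instance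

-- ===== CLAIM (what is proved, stated in full; the proofs are below) =====
def Claim_equal_checkBelow : Prop := ∀ (array : List (List String)) (word : String) (i : Int) (j : Int) (height : Int) (width : Int) (estimate : Bool), Dom_checkBelow array word i j height width estimate → Pre_checkBelow array word i j height width estimate → Spec_checkBelow array word i j height width estimate (checkBelow array word i j height width estimate)

-- ===== LEMMAS AND PROOFS =====

theorem pvWitness_ok :
    Dom_checkBelow pvWitness_checkBelow.1 pvWitness_checkBelow.2.1 pvWitness_checkBelow.2.2.1 pvWitness_checkBelow.2.2.2.1 pvWitness_checkBelow.2.2.2.2.1 pvWitness_checkBelow.2.2.2.2.2.1 pvWitness_checkBelow.2.2.2.2.2.2 ∧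
    Pre_checkBelow pvWitness_checkBelow.1 pvWitness_checkBelow.2.1 pvWitness_checkBelow.2.2.1 pvWitness_checkBelow.2.2.2.1 pvWitness_checkBelow.2.2.2.2.1 pvWitness_checkBelow.2.2.2.2.2.1 pvWitness_checkBelow.2.2.2.2.2.2 := by
  decide

-- an option-threading foldl with all steps defined equals the total foldl
theorem foldl_bind_map_some {α β γ : Type} (F : α → Option β) (G : α → β → γ → γ) (d : β) :
    ∀ (l : List α) (init : γ), (∀ x ∈ l, (F x).isSome = true) →
    l.foldl (fun acc x => acc.bind (fun m => (F x).map (fun e => G x e m))) (some init)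
      = some (l.foldl (fun m x => G x ((F x).getD d) m) init) := by
  intro l
  induction l with
  | nil => intro init _; simp
  | cons a l ih =>
    intro init h
    have ha : (F a).isSome = true := h a (by simp)
    obtain ⟨e, he⟩ := Option.isSome_iff_exists.mp ha
    simp only [List.foldl_cons, he, Option.bind_some, Option.map_some]
    rw [ih (G a e init) (fun x hx => h x (by simp [hx]))]
    simp

theorem foldl_concat_eq_map {α β : Type} (v : α → β) :
    ∀ (l : List α) (init : List β),
      l.foldl (fun t x => t ++ [v x]) init = init ++ l.map v := by
  intro l
  induction l with
  | nil => simp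
  | cons a l ih => intro init; simp [ih]

theorem foldl_count_eq_countP {α : Type} (p : α → Bool) :
    ∀ (l : List α) (init : Int),
      l.foldl (fun m x => if p x then m else m + 1) init
        = init + (l.countP (fun x => !(p x)) : Int) := by
  intro l
  induction l with
  | nil => simp
  | cons a l ih =>
    intro init
    cases hpa : p a <;> (simp [hpa, ih]; try ring)

theorem all_congr_mem {α : Type} (l : List α) (f g : α → Bool)
    (h : ∀ x ∈ l, f x = g x) : l.all f = l.all g := by
  induction l with
  | nil => rfl
  | cons a l ih =>
    simp only [List.all_cons]
    rw [h a (by simp), ih (fun x hx => h x (by simp [hx]))]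

theorem foldl_congr_mem' {α β : Type} (l : List α) (f g : β → α → β)
    (h : ∀ b, ∀ x ∈ l, f b x = g b x) : ∀ init, l.foldl f init = l.foldl g init := by
  induction l with
  | nil => intro _; rfl
  | cons a l ih =>
    intro init
    rw [List.foldl_cons, List.foldl_cons, h init a (by simp),
        ih (fun b x hx => h b x (by simp [hx]))]

theorem all_eq_decide_countP {α : Type} (l : List α) (p : α → Bool) :
    l.all p = decide (l.countP (fun x => !(p x)) = 0) := by
  induction l with
  | nil => simp
  | cons a l ih =>
    cases hpa : p a <;> simp [hpa, ih]

-- B's early-exit scan over range(a, n) equals: all match, or (estimate and exactly one mismatch)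
theorem scanB_eq (array : List (List String)) (word : String) (i : Int) (j : Int)
    (est : Bool) :
    ∀ (k : Nat) (a : Int), (((word.toList.length : Int) - a).toNat = k) →
    pvScanB array word i j est (PySem.List.pyRange a (word.toList.length : Int) 1)
      = ((PySem.List.pyRange a (word.toList.length : Int) 1).all (pvEqAt array word i j)
         || (est && decide ((PySem.List.pyRange a (word.toList.length : Int) 1).countP
              (fun x => !(pvEqAt array word i j x)) = 1))) := by
  intro k
  induction k with
  | zero =>
    intro a ha
    have hge : (word.toList.length : Int) ≤ a := by omega
    rw [PySem.List.pyRange_one_eq_nil hge]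
    simp [pvScanB]
  | succ k ih =>
    intro a ha
    have hlt : a < (word.toList.length : Int) := by omega
    rw [PySem.List.pyRange_one_cons hlt]
    simp only [pvScanB]
    cases hq : pvEqAt array word i j a with
    | true =>
      rw [ih (a + 1) (by omega)]
      simp [hq]
    | false =>
      rw [all_eq_decide_countP (PySem.List.pyRange (a + 1) (word.toList.length : Int) 1)
            (pvEqAt array word i j)]
      simp only [List.all_cons, hq, Bool.false_and, Bool.false_or,
        List.countP_cons, Bool.not_false]
      cases est <;> simp

theorem checkBelow_spec : Claim_equal_checkBelow := by
  intro array word i j height width estimate _ hpre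
  unfold Spec_checkBelow checkBelow checkBelow_alt
  by_cases hg : i + (word.toList.length : Int) - 1 < height
  · have hng : ¬ (i + (word.toList.length : Int) - 1 ≥ height) := by omega
    simp only [if_pos hg, if_neg hng]
    set n := word.toList.length with hn
    set F : Nat → Option String :=
      fun x => (PySem.List.pyGet? array (i + (x : Int))).bind (fun row => PySem.List.pyGet? row j) with hF
    have hsome : ∀ x ∈ List.range n, (F x).isSome = true := by
      intro x hx
      exact hpre hg x (List.mem_range.mp hx)
    -- the per-index match predicate (true = characters agree), as B's pvEqAt at a Nat index
    set q : Nat → Bool := fun x => pvEqAt array word i j (x : Int) with hq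
    have hqval : ∀ x ∈ List.range n,
        q x = ((word.toList[x]?).map (fun c => [c]) == (F x).map String.toList) := by
      intro x hx
      simp [hq, pvEqAt, hF]
    -- A side: temp builds successfully to the mapped list
    rw [foldl_bind_map_some F (fun _ e t => t ++ [e]) "" (List.range n) [] hsome]
    rw [foldl_concat_eq_map]
    simp only [List.nil_append]
    set temp := (List.range n).map (fun x => (F x).getD "") with htemp
    have htempGet : ∀ x, x < n → temp[x]? = some ((F x).getD "") := by
      intro x hx
      simp [htemp, hx]
    -- A's compare over temp equals (all q)
    have hcmp : pvCompare word temp = (List.range n).all q := by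
      unfold pvCompare
      rw [← hn]
      refine all_congr_mem _ _ _ ?_
      intro x hx
      have hx' : x < n := List.mem_range.mp hx
      obtain ⟨e, he⟩ := Option.isSome_iff_exists.mp (hsome x hx)
      rw [hqval x hx]
      simp [PySem.List.pyGet?_natCast, htempGet x hx', he]
    -- A's compareEstimate over temp equals (count ≤ 1)
    have hEcongr := foldl_congr_mem' (List.range n)
        (fun (acc : Int) (x : Nat) =>
          if (PySem.Str.pyGet? word (x : Int)).map (fun c => [c])
              == (PySem.List.pyGet? temp (x : Int)).map String.toList then acc
          else acc + 1)
        (fun (acc : Int) (x : Nat) => if q x then acc else acc + 1)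
        (by
          intro acc x hx
          have hx' : x < n := List.mem_range.mp hx
          obtain ⟨e, he⟩ := Option.isSome_iff_exists.mp (hsome x hx)
          simp [hqval x hx, PySem.List.pyGet?_natCast, htempGet x hx', he])
    have hest : pvCompareEstimate word temp
        = decide (((List.range n).countP (fun x => !(q x)) : Int) ≤ 1) := by
      unfold pvCompareEstimate
      rw [← hn, hEcongr 0, foldl_count_eq_countP q (List.range n) 0]
      set k := (List.range n).countP (fun x => !(q x))
      by_cases hk : ((k : Int) > 1) <;> simp [hk] <;> omega
    -- B side: the early-exit scan over range(0, n)
    rw [scanB_eq array word i j estimate ((n : Int) - 0).toNat 0 rfl]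
    -- bridge pyRange 0 n 1 to (List.range n).map Int.ofNat
    have hbr : PySem.List.pyRange 0 (n : Int) 1
        = (List.range n).map (fun k : Nat => (k : Int)) := by
      rw [PySem.List.pyRange_one]
      simp
    rw [hbr, List.all_map, List.countP_map]
    have hallB : (List.range n).all ((pvEqAt array word i j) ∘ (fun k : Nat => (k : Int)))
        = (List.range n).all q := by
      refine all_congr_mem _ _ _ ?_
      intro x _
      simp [hq, Function.comp]
    have hcntB : (List.range n).countP ((fun x => !(pvEqAt array word i j x)) ∘ (fun k : Nat => (k : Int)))
        = (List.range n).countP (fun x => !(q x)) := by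
      refine List.countP_congr ?_
      intro x _
      simp [hq, Function.comp]
    rw [hallB, hcntB]
    simp only [hcmp, hest]
    rw [all_eq_decide_countP (List.range n) q]
    set c := (List.range n).countP (fun x => !(q x)) with hc
    have h01 : ((c : Int) ≤ 1) ↔ (c = 0 ∨ c = 1) := by omega
    cases estimate <;> simp [h01, Bool.decide_or]
  · have hng : i + (word.toList.length : Int) - 1 ≥ height := by omega
    rw [if_neg hg, if_pos hng]
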